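-- pv_equiv track=rewrite | github.com/kaihuan-huang/Review | LC/Memory_point.py | maximizeTotalMemoryPoints
-- ===== SOURCE A (Python) =====
-- def maximizeTotalMemoryPoints(memory):
--     # Step 1: Sort memory points in descending order
--     memory.sort(reverse=True)
--
--     # Step 2: Calculate prefix sums and total memory points
--     total_points = 0
--     prefix_sum = 0
--     for points in memory:
--         prefix_sum += points
--         total_points += prefix_sum
--
--     return total_points
-- ===== SOURCE B (Python) =====
-- def maximizeTotalMemoryPoints(memory):
--     memory.sort(reverse=True)
--     n = len(memory)
--     return sum(p * (n - i) for i, p in enumerate(memory))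
-- ===== Notes on version B (the rewrite author's own statement) =====
-- stated objective: alternative
-- what changed: Replaces the running prefix-sum accumulator loop with a direct rank-weighted sum: after the same in-place descending sort, the element at index i is counted (n - i) times via enumerate.
import Mathlib
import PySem

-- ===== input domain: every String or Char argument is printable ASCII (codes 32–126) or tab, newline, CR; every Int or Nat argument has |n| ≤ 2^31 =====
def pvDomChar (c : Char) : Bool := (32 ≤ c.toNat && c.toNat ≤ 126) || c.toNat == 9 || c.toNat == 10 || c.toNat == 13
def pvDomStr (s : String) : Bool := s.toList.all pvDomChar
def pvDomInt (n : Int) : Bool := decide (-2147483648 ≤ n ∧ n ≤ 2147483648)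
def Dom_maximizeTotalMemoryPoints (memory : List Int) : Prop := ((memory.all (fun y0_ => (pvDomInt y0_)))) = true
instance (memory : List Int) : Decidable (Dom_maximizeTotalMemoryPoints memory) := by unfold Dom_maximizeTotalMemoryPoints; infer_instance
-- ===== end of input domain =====

-- B replaces A's running prefix-sum accumulator with a direct rank-weighted sum over the
-- same descending-sorted list (alternative decomposition, same cost). A sorts its argument
-- in place; the equivalence proved here is about the RETURN value only.

-- ===== PORT A =====
def maximizeTotalMemoryPoints (memory : List Int) : Int :=
  let sorted := PySem.List.sorted memory (fun x => x) true
  (sorted.foldl (fun tp points => (tp.1 + (tp.2 + points), tp.2 + points)) (0, 0)).1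

-- ===== PORT B =====
def maximizeTotalMemoryPoints_alt (memory : List Int) : Int :=
  let sorted := PySem.List.sorted memory (fun x => x) true
  let n : Int := sorted.length
  (PySem.List.enumerate sorted 0).foldl (fun acc ip => acc + ip.2 * (n - ip.1)) 0

-- ===== PRECONDITION & SPEC =====
def Spec_maximizeTotalMemoryPoints (memory : List Int) (out : Int) : Prop := out = maximizeTotalMemoryPoints_alt memory
instance (memory : List Int) (out : Int) : Decidable (Spec_maximizeTotalMemoryPoints memory out) := by unfold Spec_maximizeTotalMemoryPoints; infer_instance

-- ===== CLAIM (what is proved, stated in full; the proofs are below) =====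
def Claim_equal_maximizeTotalMemoryPoints : Prop := ∀ (memory : List Int), Dom_maximizeTotalMemoryPoints memory → Spec_maximizeTotalMemoryPoints memory (maximizeTotalMemoryPoints memory)

-- ===== LEMMAS AND PROOFS =====

-- A's prefix-sum loop from state (t, p) equals t + |xs|·p plus the rank-weighted sum of xs
-- enumerated from s, provided n - s = |xs| (so the element at enumerate-index i weighs n - i).
theorem pv_fold_eq_weighted (n : Int) :
    ∀ (xs : List Int) (t p s : Int), n - s = xs.length →
      (xs.foldl (fun tp points => (tp.1 + (tp.2 + points), tp.2 + points)) (t, p)).1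
        = t + xs.length * p
          + ((PySem.List.enumerate xs s).map (fun ip => ip.2 * (n - ip.1))).sum := by
  intro xs
  induction xs with
  | nil => intro t p s _; simp [PySem.List.enumerate_nil]
  | cons x tail ih =>
      intro t p s h
      have h' : n - (s + 1) = tail.length := by
        simp at h; omega
      rw [List.foldl_cons, PySem.List.enumerate_cons]
      rw [ih (t + (p + x)) (p + x) (s + 1) h']
      simp only [List.map_cons, List.sum_cons, List.length_cons]
      have hx : (n - s) = (tail.length : Int) + 1 := by
        simp at h; omega
      push_cast
      rw [hx]
      ring

theorem maximizeTotalMemoryPoints_eq (memory : List Int) :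
    maximizeTotalMemoryPoints memory = maximizeTotalMemoryPoints_alt memory := by
  unfold maximizeTotalMemoryPoints maximizeTotalMemoryPoints_alt
  set s := PySem.List.sorted memory (fun x => x) true with hs
  rw [PySem.List.foldl_add]
  have := pv_fold_eq_weighted (n := (s.length : Int)) s 0 0 0 (by simp)
  simpa using this

-- ===== VERDICT (by name: the statement is the Claim_ definition above) =====
theorem maximizeTotalMemoryPoints_spec : Claim_equal_maximizeTotalMemoryPoints := by
  intro memory _
  exact maximizeTotalMemoryPoints_eq memory
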